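-- pv_equiv track=rewrite | github.com/CHHyuk/CodingTestPrac | Programmers_Quiz/ProgrammersQuiz_Lv.2/023.py | solution
-- ===== SOURCE A (Python) =====
-- def solution(n, left, right):
--     array = []
--     result = []
--     temp_left = left - ((left//n) * n)
--     temp_right = right - ((left//n) * n)
--     for _ in range(left//n,(right//n)+1):
--         for i in range(1,n+1):
--             if left//n >= i:
--                 array.append(int((left//n)+1))
--             else:
--                 array.append(i)
--         left += n
--     for j in range(temp_left,temp_right + 1):
--         result.append(array[j])
--     return result
-- ===== SOURCE B (Python) =====
-- def solution(n, left, right):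
--     return [max(k // n, k % n) + 1 for k in range(left, right + 1)]
-- ===== Notes on version B (the rewrite author's own statement) =====
-- stated objective: simpler
-- what changed: B computes each output element directly from its flat index k as max(k//n, k%n)+1 in one comprehension over range(left, right+1), instead of materialising whole board rows into an intermediate array and then copying out a slice.
import Mathlib
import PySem

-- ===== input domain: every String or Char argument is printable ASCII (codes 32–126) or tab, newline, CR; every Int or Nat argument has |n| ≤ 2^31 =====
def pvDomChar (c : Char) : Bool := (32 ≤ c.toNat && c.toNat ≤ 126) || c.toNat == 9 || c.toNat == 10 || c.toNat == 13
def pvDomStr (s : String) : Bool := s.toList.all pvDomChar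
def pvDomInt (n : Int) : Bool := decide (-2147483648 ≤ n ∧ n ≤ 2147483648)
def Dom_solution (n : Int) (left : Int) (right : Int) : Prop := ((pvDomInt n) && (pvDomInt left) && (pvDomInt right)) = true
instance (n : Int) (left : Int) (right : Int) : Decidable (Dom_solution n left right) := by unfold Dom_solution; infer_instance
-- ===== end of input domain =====

-- B replaces A's row-building + window copy with a direct per-index formula max(k//n, k%n)+1; objective: simpler.

-- ===== PORT A =====
-- literal transliteration of A: build the full rows left//n .. right//n into `array`
-- (the mutated `left` is the second component of the fold state), then copy the window
-- array[temp_left .. temp_right] into `result`.  array[j] is never out of range under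
-- Pre_solution, so the total pyGetD form (default 0) is exact there.
def solution (n : Int) (left : Int) (right : Int) : List Int :=
  let temp_left := left - (PySem.Int.floordiv left n) * n
  let temp_right := right - (PySem.Int.floordiv left n) * n
  let st :=
    (PySem.List.pyRange (PySem.Int.floordiv left n) (PySem.Int.floordiv right n + 1) 1).foldl
      (fun (st : List Int × Int) _ =>
        ((PySem.List.pyRange 1 (n + 1) 1).foldl
            (fun arr i =>
              if PySem.Int.floordiv st.2 n ≥ i then arr ++ [PySem.Int.floordiv st.2 n + 1]
              else arr ++ [i]) st.1,
         st.2 + n)) ([], left)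
  (PySem.List.pyRange temp_left (temp_right + 1) 1).foldl
    (fun res j => res ++ [PySem.List.pyGetD st.1 j 0]) []

-- ===== PORT B =====
def solution_alt (n : Int) (left : Int) (right : Int) : List Int :=
  (PySem.List.pyRange left (right + 1) 1).map
    (fun k => max (PySem.Int.floordiv k n) (PySem.Int.mod k n) + 1)

-- ===== PRECONDITION & SPEC =====
-- Exactly the inputs on which A returns: n = 0 raises ZeroDivisionError, and n ≤ -1 with
-- left ≤ right raises IndexError (the rows are empty but the copy loop is not).
def Pre_solution (n : Int) (left : Int) (right : Int) : Prop :=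
  1 ≤ n ∨ (n ≤ -1 ∧ right < left)
instance (n : Int) (left : Int) (right : Int) : Decidable (Pre_solution n left right) := by
  unfold Pre_solution; infer_instance

def pvWitness_solution : Int × Int × Int := (3, 2, 8)

def Spec_solution (n : Int) (left : Int) (right : Int) (out : List Int) : Prop := out = solution_alt n left right
instance (n : Int) (left : Int) (right : Int) (out : List Int) : Decidable (Spec_solution n left right out) := by unfold Spec_solution; infer_instance

-- ===== CLAIM (what is proved, stated in full; the proofs are below) =====
def Claim_equal_solution : Prop := ∀ (n : Int) (left : Int) (right : Int), Dom_solution n left right → Pre_solution n left right → Spec_solution n left right (solution n left right)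

-- ===== LEMMAS AND PROOFS =====

-- the board value at flat index k
def pvF (n k : Int) : Int := max (PySem.Int.floordiv k n) (PySem.Int.mod k n) + 1

-- shifting the range under a map
theorem pvRange_map_shift {α : Type} (a b c : Int) (f : Int → α) :
    (PySem.List.pyRange (a + c) (b + c) 1).map f
      = (PySem.List.pyRange a b 1).map (fun k => f (k + c)) := by
  simp only [PySem.List.pyRange_one, List.map_map]
  have h : b + c - (a + c) = b - a := by ring
  rw [h]
  refine List.map_congr_left (fun k _ => ?_)
  simp only [Function.comp]
  ring_nf

-- the floor quotient and remainder of a flat index  a*n + c,  0 ≤ c < n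
theorem pvFlat (n a c : Int) (hn : 1 ≤ n) (h0 : 0 ≤ c) (h1 : c < n) :
    PySem.Int.floordiv (a * n + c) n = a ∧ PySem.Int.mod (a * n + c) n = c := by
  have hfd : PySem.Int.floordiv (a * n + c) n = a := by
    rw [PySem.Int.floordiv_eq_iff_of_pos (by omega)]
    constructor <;> nlinarith
  refine ⟨hfd, ?_⟩
  have := PySem.Int.floordiv_mul_add_mod (a * n + c) n
  rw [hfd] at this; omega

-- one row of A equals the formula on the corresponding flat indices
theorem pvRow_eq (n a : Int) (hn : 1 ≤ n) :
    (PySem.List.pyRange 1 (n + 1) 1).map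
        (fun i => if a ≥ i then a + 1 else i)
      = (PySem.List.pyRange (a * n) ((a + 1) * n) 1).map (pvF n) := by
  simp only [PySem.List.pyRange_one, List.map_map]
  have h1 : n + 1 - 1 = n := by ring
  have h2 : (a + 1) * n - a * n = n := by ring
  rw [h1, h2]
  refine List.map_congr_left (fun c hc => ?_)
  have hc' : (c : Int) < n := by
    have := List.mem_range.mp hc
    omega
  have h0 : (0 : Int) ≤ (c : Int) := Int.natCast_nonneg c
  obtain ⟨hfd, hmod⟩ := pvFlat n a c hn h0 hc'
  simp only [Function.comp, pvF, hfd, hmod]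
  by_cases h : a ≥ 1 + (c : Int)
  · rw [if_pos h]; omega
  · rw [if_neg h]; omega

-- the outer fold builds exactly the formula-board over rows a .. b-1
theorem pvOuter (n : Int) (hn : 1 ≤ n) :
    ∀ (cnt : Nat) (a b l : Int) (acc : List Int),
      b - a = cnt → PySem.Int.floordiv l n = a →
      ((PySem.List.pyRange a b 1).foldl
        (fun (st : List Int × Int) _ =>
          ((PySem.List.pyRange 1 (n + 1) 1).foldl
            (fun arr i =>
              if PySem.Int.floordiv st.2 n ≥ i then arr ++ [PySem.Int.floordiv st.2 n + 1]
              else arr ++ [i]) st.1,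
           st.2 + n)) (acc, l)).1
      = acc ++ (PySem.List.pyRange (a * n) (b * n) 1).map (pvF n) := by
  intro cnt
  induction cnt with
  | zero =>
    intro a b l acc hab _
    have hb : b ≤ a := by omega
    rw [PySem.List.pyRange_one_eq_nil hb,
        PySem.List.pyRange_one_eq_nil (by nlinarith : b * n ≤ a * n)]
    simp
  | succ m ih =>
    intro a b l acc hab hl
    have hab' : a < b := by omega
    rw [PySem.List.pyRange_one_cons hab', List.foldl_cons]
    have hrow :
        (PySem.List.pyRange 1 (n + 1) 1).foldl
          (fun arr i =>
            if PySem.Int.floordiv l n ≥ i then arr ++ [PySem.Int.floordiv l n + 1]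
            else arr ++ [i]) acc
        = acc ++ (PySem.List.pyRange (a * n) ((a + 1) * n) 1).map (pvF n) := by
      simp only [hl]
      rw [show (fun (arr : List Int) (i : Int) =>
            if a ≥ i then arr ++ [a + 1] else arr ++ [i])
          = (fun arr i => arr ++ [if a ≥ i then a + 1 else i]) by
            funext arr i; split_ifs <;> rfl]
      rw [PySem.List.foldl_append_singleton_eq_map, pvRow_eq n a hn]
    have hl' : PySem.Int.floordiv (l + n) n = a + 1 := by
      rw [PySem.Int.floordiv_eq_ediv_of_pos (by omega)] at hl ⊢
      rw [show l + n = l + 1 * n by ring, Int.add_mul_ediv_right l 1 (by omega : n ≠ 0), hl]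
    have hmain := ih (a + 1) b (l + n)
      (acc ++ (PySem.List.pyRange (a * n) ((a + 1) * n) 1).map (pvF n)) (by omega) hl'
    calc ((PySem.List.pyRange (a + 1) b 1).foldl
        (fun (st : List Int × Int) _ =>
          ((PySem.List.pyRange 1 (n + 1) 1).foldl
            (fun arr i =>
              if PySem.Int.floordiv st.2 n ≥ i then arr ++ [PySem.Int.floordiv st.2 n + 1]
              else arr ++ [i]) st.1,
           st.2 + n))
        ((PySem.List.pyRange 1 (n + 1) 1).foldl
            (fun arr i =>
              if PySem.Int.floordiv l n ≥ i then arr ++ [PySem.Int.floordiv l n + 1]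
              else arr ++ [i]) acc,
         l + n)).1
        = ((PySem.List.pyRange (a + 1) b 1).foldl
            (fun (st : List Int × Int) _ =>
              ((PySem.List.pyRange 1 (n + 1) 1).foldl
                (fun arr i =>
                  if PySem.Int.floordiv st.2 n ≥ i then arr ++ [PySem.Int.floordiv st.2 n + 1]
                  else arr ++ [i]) st.1,
               st.2 + n))
            (acc ++ (PySem.List.pyRange (a * n) ((a + 1) * n) 1).map (pvF n), l + n)).1 := by
          rw [hrow]
      _ = acc ++ (PySem.List.pyRange (a * n) (b * n) 1).map (pvF n) := by
          rw [hmain, List.append_assoc, ← List.map_append,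
              ← PySem.List.pyRange_one_append (a * n) ((a + 1) * n) (b * n)
                (by nlinarith) (by nlinarith)]

theorem solution_eq_alt (n left right : Int) (h : Pre_solution n left right) :
    solution n left right = solution_alt n left right := by
  by_cases hrl : right < left
  · -- empty window: both programs return []
    unfold solution solution_alt
    dsimp only
    have hne : n ≠ 0 := by rcases h with h | h <;> omega
    rw [PySem.List.pyRange_one_eq_nil
          (by omega : right - PySem.Int.floordiv left n * n + 1
              ≤ left - PySem.Int.floordiv left n * n),
        PySem.List.pyRange_one_eq_nil (by omega : right + 1 ≤ left)]
    simp
  · have hn : 1 ≤ n := by rcases h with h | h <;> omega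
    have hlr : left ≤ right := by omega
    have hnpos : (0 : Int) < n := by omega
    unfold solution solution_alt
    dsimp only
    set r0 := PySem.Int.floordiv left n with hr0
    set r1 := PySem.Int.floordiv right n with hr1
    have hr01 : r0 ≤ r1 := by
      rw [hr0, hr1, PySem.Int.floordiv_eq_ediv_of_pos hnpos,
          PySem.Int.floordiv_eq_ediv_of_pos hnpos]
      exact Int.ediv_le_ediv hnpos hlr
    have hbl : r0 * n ≤ left ∧ left < (r0 + 1) * n := by
      have := (PySem.Int.floordiv_eq_iff_of_pos hnpos).mp hr0.symm
      omega
    have hbr : r1 * n ≤ right ∧ right < (r1 + 1) * n := by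
      have := (PySem.Int.floordiv_eq_iff_of_pos hnpos).mp hr1.symm
      omega
    have harr := pvOuter n hn (r1 + 1 - r0).toNat r0 (r1 + 1) left [] (by omega) hr0.symm
    rw [harr]
    simp only [List.nil_append]
    -- express the board shifted to start at 0
    have hshift : (PySem.List.pyRange (r0 * n) ((r1 + 1) * n) 1).map (pvF n)
        = (PySem.List.pyRange 0 ((r1 + 1) * n - r0 * n) 1).map (fun k => pvF n (k + r0 * n)) := by
      have := pvRange_map_shift 0 ((r1 + 1) * n - r0 * n) (r0 * n) (pvF n)
      rw [show (0 : Int) + r0 * n = r0 * n by ring,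
          show (r1 + 1) * n - r0 * n + r0 * n = (r1 + 1) * n by ring] at this
      exact this
    -- the copy loop is a map
    rw [PySem.List.foldl_append_singleton_eq_map, List.nil_append]
    -- each copied element is the formula at the absolute flat index
    have hcopy : (PySem.List.pyRange (left - r0 * n) (right - r0 * n + 1) 1).map
          (fun j => PySem.List.pyGetD ((PySem.List.pyRange (r0 * n) ((r1 + 1) * n) 1).map (pvF n)) j 0)
        = (PySem.List.pyRange (left - r0 * n) (right - r0 * n + 1) 1).map
          (fun j => pvF n (j + r0 * n)) := by
      refine List.map_congr_left (fun j hj => ?_)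
      have hj' := (PySem.List.mem_pyRange_one).mp hj
      rw [hshift]
      exact PySem.List.pyGetD_map_pyRange_of_nonneg (fun k => pvF n (k + r0 * n))
        ((r1 + 1) * n - r0 * n) j 0 (by omega) (by omega)
    rw [hcopy]
    have hfin := pvRange_map_shift (left - r0 * n) (right - r0 * n + 1) (r0 * n) (pvF n)
    rw [show left - r0 * n + r0 * n = left by ring,
        show right - r0 * n + 1 + r0 * n = right + 1 by ring] at hfin
    rw [← hfin]
    rfl

-- ===== VERDICT (by name: the statement is the Claim_ definition above) =====
theorem solution_spec : Claim_equal_solution := by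
  intro n left right _ hpre
  exact solution_eq_alt n left right hpre
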